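-- pv_equiv track=rewrite | github.com/fjguaita/codesignal | Arcade/Intro/08_matrixElementsSum.py | matrixElementsSum2
-- ===== SOURCE A (Python) =====
-- def matrixElementsSum2(m):
--     s=0
--     unzip = zip(*m)
--     for i in unzip:
--         for j in i:
--             if(j==0):
--                 break
--             else:
--                 s+=j
--     return s
-- ===== SOURCE B (Python) =====
-- def matrixElementsSum2(m):
--     if not m:
--         return 0
--     w = min(len(r) for r in m)
--     blocked = set()
--     s = 0
--     for row in m:
--         for c in range(w):
--             if c in blocked:
--                 continue
--             v = row[c]
--             if v == 0:
--                 blocked.add(c)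
--             else:
--                 s += v
--     return s
-- ===== Notes on version B (the rewrite author's own statement) =====
-- stated objective: alternative
-- what changed: Replaced the column-major 'zip(*m) transpose, then sum each column breaking at the first zero' with a single row-major pass over the matrix that maintains a set of column indices already blocked by a zero.
import Mathlib
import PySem

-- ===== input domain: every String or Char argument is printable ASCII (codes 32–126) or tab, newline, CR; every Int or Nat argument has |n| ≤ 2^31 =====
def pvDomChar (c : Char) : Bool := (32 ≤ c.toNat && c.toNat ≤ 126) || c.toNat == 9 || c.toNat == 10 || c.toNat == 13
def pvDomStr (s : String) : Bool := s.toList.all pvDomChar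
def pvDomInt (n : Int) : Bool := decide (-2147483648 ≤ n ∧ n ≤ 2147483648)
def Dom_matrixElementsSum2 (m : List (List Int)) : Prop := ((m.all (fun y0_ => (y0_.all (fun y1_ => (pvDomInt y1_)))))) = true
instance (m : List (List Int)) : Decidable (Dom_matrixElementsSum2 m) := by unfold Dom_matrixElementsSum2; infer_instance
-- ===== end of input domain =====

-- B replaces A's column-major "transpose with zip, then break at the first zero" by a single
-- row-major pass that keeps a set of already-blocked column indices (objective: alternative).

-- ===== PORT A =====
-- zip(*m): columns of m, truncated at the shortest row (empty for m = []).
def pyZipStar : List (List Int) → List (List Int)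
  | [] => []
  | r :: rs =>
    if h : ((r :: rs).any (·.isEmpty)) = true then []
    else ((r :: rs).map (·.headD 0)) :: pyZipStar ((r :: rs).map (·.tail))
termination_by m => (m.headD []).length
decreasing_by
  simp only [List.map_cons, List.headD_cons, List.length_tail]
  simp only [List.any_cons, Bool.or_eq_true, not_or] at h
  have : r.length ≠ 0 := by
    intro h0
    exact h.1 (by simpa [List.isEmpty_iff, List.length_eq_zero_iff] using h0)
  omega

-- inner 'for j in i: if j==0: break else: s+=j'
def innerLoopA (s : Int) : List Int → Int
  | [] => s
  | j :: t => if j = 0 then s else innerLoopA (s + j) t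

def matrixElementsSum2 (m : List (List Int)) : Int :=
  (pyZipStar m).foldl innerLoopA 0

-- ===== PORT B =====
def matrixElementsSum2_alt (m : List (List Int)) : Int :=
  match m with
  | [] => 0
  | r :: rs =>
    let w := rs.foldl (fun a row => min a row.length) r.length
    let st := (r :: rs).foldl
      (fun (st : PySem.Set Nat × Int) row =>
        (List.range w).foldl
          (fun st c =>
            if PySem.Set.contains st.1 c then st
            else
              let v := row.getD c 0
              if v = 0 then (PySem.Set.add st.1 c, st.2) else (st.1, st.2 + v))
          st)
      (PySem.Set.empty, 0)
    st.2

-- ===== PRECONDITION & SPEC =====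
def Spec_matrixElementsSum2 (m : List (List Int)) (out : Int) : Prop := out = matrixElementsSum2_alt m
instance (m : List (List Int)) (out : Int) : Decidable (Spec_matrixElementsSum2 m out) := by unfold Spec_matrixElementsSum2; infer_instance

-- ===== CLAIM (what is proved, stated in full; the proofs are below) =====
def Claim_equal_matrixElementsSum2 : Prop := ∀ (m : List (List Int)), Dom_matrixElementsSum2 m → Spec_matrixElementsSum2 m (matrixElementsSum2 m)

-- ===== LEMMAS AND PROOFS =====

-- column c of rows (getD is exact for c below every row length)
def colG (rows : List (List Int)) (c : Nat) : List Int := rows.map (fun r => r.getD c 0)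

-- sum of a column until its first zero
def sumBreak : List Int → Int
  | [] => 0
  | j :: t => if j = 0 then 0 else j + sumBreak t

theorem innerLoopA_eq (l : List Int) : ∀ s : Int, innerLoopA s l = s + sumBreak l := by
  induction l with
  | nil => intro s; simp [innerLoopA, sumBreak]
  | cons j t ih =>
    intro s
    simp only [innerLoopA, sumBreak]
    split_ifs with h
    · simp
    · rw [ih]; ring

theorem foldlA_eq (cols : List (List Int)) : ∀ s : Int,
    cols.foldl innerLoopA s = s + (cols.map sumBreak).sum := by
  induction cols with
  | nil => intro s; simp
  | cons c t ih =>
    intro s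
    simp only [List.foldl_cons, List.map_cons, List.sum_cons]
    rw [ih, innerLoopA_eq]; ring

-- the fold computing w in port B
def fW (rs : List (List Int)) (i : Nat) : Nat :=
  rs.foldl (fun a row => min a row.length) i

theorem fW_le_init (rs : List (List Int)) : ∀ i, fW rs i ≤ i := by
  induction rs with
  | nil => intro i; simp [fW]
  | cons r t ih =>
    intro i
    calc fW t (min i r.length) ≤ min i r.length := ih _
      _ ≤ i := Nat.min_le_left _ _

theorem fW_le_mem (rs : List (List Int)) : ∀ i, ∀ q ∈ rs, fW rs i ≤ q.length := by
  induction rs with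
  | nil => intro i q hq; simp at hq
  | cons r t ih =>
    intro i q hq
    rcases List.mem_cons.1 hq with h | h
    · subst h
      calc fW t (min i q.length) ≤ min i q.length := fW_le_init _ _
        _ ≤ q.length := Nat.min_le_right _ _
    · exact ih _ q h

theorem fW_tail (rs : List (List Int)) : ∀ i,
    fW (rs.map (·.tail)) (i - 1) = fW rs i - 1 := by
  induction rs with
  | nil => intro i; simp [fW]
  | cons r t ih =>
    intro i
    simp only [List.map_cons, fW, List.foldl_cons] at *
    have : min (i - 1) r.tail.length = min i r.length - 1 := by
      simp only [List.length_tail]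
      rw [Nat.min_def, Nat.min_def]
      split_ifs <;> omega
    rw [this, ih]

-- w of the whole matrix (= the w port B computes, for m ≠ [])
def wAll : List (List Int) → Nat
  | [] => 0
  | r :: rs => fW rs r.length

theorem getD_succ_tail (r : List Int) (c : Nat) : r.getD (c + 1) 0 = r.tail.getD c 0 := by
  cases r <;> simp [List.getD]

theorem colG_zero (m : List (List Int)) : colG m 0 = m.map (·.headD 0) := by
  unfold colG
  congr 1
  funext r
  cases r <;> simp [List.getD]

theorem colG_tail (m : List (List Int)) (c : Nat) :
    colG (m.map (·.tail)) c = colG m (c + 1) := by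
  unfold colG
  rw [List.map_map]
  congr 1
  funext r
  exact (getD_succ_tail r c).symm

theorem pyZipStar_eq (n : Nat) : ∀ m : List (List Int), wAll m = n →
    pyZipStar m = (List.range n).map (colG m) := by
  induction n with
  | zero =>
    intro m hw
    match m with
    | [] => simp [pyZipStar]
    | r :: rs =>
      have hany : ((r :: rs).any (·.isEmpty)) = true := by
        by_contra hne
        simp only [List.any_eq_true] at hne
        push_neg at hne
        have h1 : r.length ≠ 0 := by
          have := hne r (by simp)
          simp [List.isEmpty_iff] at this
          simpa [List.length_eq_zero_iff]
        have hfpos : ∀ t i, (∀ q ∈ t, q.length ≠ 0) → i ≠ 0 → fW t i ≠ 0 := by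
          intro t
          induction t with
          | nil => intro i _ hi; simpa [fW]
          | cons q u ih =>
            intro i hq hi
            simp only [fW, List.foldl_cons]
            refine ih _ (fun a ha => hq a (by simp [ha])) ?_
            have := hq q (by simp)
            rw [Nat.min_def]
            split_ifs <;> omega
        refine hfpos rs r.length ?_ h1 (by simpa [wAll] using hw)
        intro q hq
        have := hne q (by simp [hq])
        simp [List.isEmpty_iff] at this
        simpa [List.length_eq_zero_iff]
      simp [pyZipStar, hany]
  | succ n ih =>
    intro m hw
    match m with
    | [] => simp [wAll] at hw
    | r :: rs =>
      have hnoemp : (r :: rs).any (·.isEmpty) = false := by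
        by_contra h
        simp only [Bool.not_eq_false, List.any_eq_true] at h
        obtain ⟨q, hq, hqe⟩ := h
        simp [List.isEmpty_iff] at hqe
        have hle : fW rs r.length ≤ q.length := by
          rcases List.mem_cons.1 hq with h | h
          · subst h; exact fW_le_init _ _
          · exact fW_le_mem _ _ _ h
        rw [hqe] at hle
        have hw' : fW rs r.length = n + 1 := hw
        simp at hle
        omega
      have hw' : fW rs r.length = n + 1 := hw
      have hwt : wAll ((r :: rs).map (·.tail)) = n := by
        simp only [List.map_cons, wAll]
        have := fW_tail rs r.length
        simp only [List.length_tail] at this ⊢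
        rw [this]
        omega
      rw [pyZipStar]
      simp only [hnoemp, Bool.false_eq_true, dite_false]
      rw [ih _ hwt, List.range_succ_eq_map]
      simp only [List.map_cons, List.map_map]
      congr 1
      · rw [colG_zero]; simp
      · exact List.map_congr_left (fun c _ => by
          simpa using colG_tail (r :: rs) c)

-- sum over columns splitting the "if zero" branch
theorem sum_if_split (rc g : Nat → Int) : ∀ (L : List Nat) (q : Nat → Bool),
    ((L.filter q).map (fun c => if rc c = 0 then (0:Int) else rc c + g c)).sum
      = ((L.filter (fun c => q c && !(rc c == 0))).map rc).sum
        + ((L.filter (fun c => q c && !(rc c == 0))).map g).sum := by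
  intro L
  induction L with
  | nil => intro q; simp
  | cons c t ih =>
    intro q
    by_cases hq : q c = true
    · by_cases hz : rc c = 0
      · simp [List.filter_cons, hq, hz, ih]
      · simp only [List.filter_cons, hq, hz, if_true]
        simp [hz, ih q]
        ring
    · simp [List.filter_cons, hq, ih]

-- one step of B's inner loop (definitionally the lambda in port B)
def stepB (row : List Int) (st : PySem.Set Nat × Int) (c : Nat) : PySem.Set Nat × Int :=
  if PySem.Set.contains st.1 c then st
  else if row.getD c 0 = 0 then (PySem.Set.add st.1 c, st.2) else (st.1, st.2 + row.getD c 0)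

-- one row: the inner fold over the column indices
theorem inner_fold (row : List Int) : ∀ (L : List Nat) (b : PySem.Set Nat) (s : Int),
    (L.foldl (stepB row) (b, s)).2
      = s + ((L.filter (fun c => !PySem.Set.contains b c && !(row.getD c 0 == 0))).map
          (fun c => row.getD c 0)).sum
    ∧ ∀ c : Nat,
      (PySem.Set.contains (L.foldl (stepB row) (b, s)).1 c = true
        ↔ (PySem.Set.contains b c = true ∨ (c ∈ L ∧ row.getD c 0 = 0))) := by
  intro L
  induction L with
  | nil => intro b s; exact ⟨by simp, by simp⟩
  | cons c0 L ih =>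
    intro b s
    by_cases h0 : PySem.Set.contains b c0 = true
    · constructor
      · have := (ih b s).1
        simp only [List.foldl_cons, stepB, h0, if_true, List.filter_cons]
        simp [h0, this]
      · intro c
        simp only [List.foldl_cons, stepB, h0, if_true]
        rw [(ih b s).2 c]
        simp only [List.mem_cons]
        constructor
        · rintro (h | ⟨h1, h2⟩)
          · exact Or.inl h
          · exact Or.inr ⟨Or.inr h1, h2⟩
        · rintro (h | ⟨h1 | h1, h2⟩)
          · exact Or.inl h
          · subst h1; exact Or.inl h0
          · exact Or.inr ⟨h1, h2⟩
    · by_cases hz : row.getD c0 0 = 0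
      · have hz' : row[c0]?.getD 0 = 0 := by simpa [List.getD] using hz
        have hmemadd : ∀ c, PySem.Set.contains (PySem.Set.add b c0) c = true
            ↔ (PySem.Set.contains b c = true ∨ c = c0) := by
          intro c
          rw [PySem.Set.contains_iff, PySem.Set.mem_add, PySem.Set.contains_iff]
        constructor
        · have := (ih (PySem.Set.add b c0) s).1
          simp only [List.foldl_cons, stepB, h0, if_false, hz, if_true, Bool.false_eq_true]
          rw [this]
          have hfe : (L.filter (fun c => !PySem.Set.contains (PySem.Set.add b c0) c
                && !(row.getD c 0 == 0)))
              = (L.filter (fun c => !PySem.Set.contains b c && !(row.getD c 0 == 0))) := by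
            apply List.filter_congr
            intro c _
            by_cases hc0 : c = c0
            · subst hc0; simp [hz']
            · have : PySem.Set.contains (PySem.Set.add b c0) c = PySem.Set.contains b c := by
                rw [Bool.eq_iff_iff, hmemadd c]
                constructor
                · rintro (h | h)
                  · exact h
                  · exact absurd h hc0
                · exact Or.inl
              rw [this]
          rw [hfe]
          simp [List.filter_cons, hz']
        · intro c
          simp only [List.foldl_cons, stepB, h0, if_false, hz, if_true, Bool.false_eq_true]
          rw [(ih (PySem.Set.add b c0) s).2 c, hmemadd c]
          simp only [List.mem_cons]
          constructor
          · rintro ((h | h) | ⟨h1, h2⟩)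
            · exact Or.inl h
            · subst h; exact Or.inr ⟨Or.inl rfl, hz⟩
            · exact Or.inr ⟨Or.inr h1, h2⟩
          · rintro (h | ⟨h1 | h1, h2⟩)
            · exact Or.inl (Or.inl h)
            · subst h1; exact Or.inl (Or.inr rfl)
            · exact Or.inr ⟨h1, h2⟩
      · constructor
        · have := (ih b (s + row.getD c0 0)).1
          simp only [List.foldl_cons, stepB, h0, if_false, hz, Bool.false_eq_true]
          rw [this]
          have hz' : ¬ row[c0]?.getD 0 = 0 := by simpa [List.getD] using hz
          have h0' : c0 ∉ b := by
            intro hmem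
            exact h0 ((PySem.Set.contains_iff b c0).mpr hmem)
          simp [List.filter_cons, h0', hz']
          ring
        · intro c
          simp only [List.foldl_cons, stepB, h0, if_false, hz, Bool.false_eq_true]
          rw [(ih b (s + row.getD c0 0)).2 c]
          simp only [List.mem_cons]
          constructor
          · rintro (h | ⟨h1, h2⟩)
            · exact Or.inl h
            · exact Or.inr ⟨Or.inr h1, h2⟩
          · rintro (h | ⟨h1 | h1, h2⟩)
            · exact Or.inl h
            · subst h1; exact absurd h2 hz
            · exact Or.inr ⟨h1, h2⟩

-- all rows: the outer fold
theorem outer_fold (w : Nat) : ∀ (rows : List (List Int)) (b : PySem.Set Nat) (s : Int),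
    (rows.foldl (fun st row => (List.range w).foldl (stepB row) st) (b, s)).2
      = s + (((List.range w).filter (fun c => !PySem.Set.contains b c)).map
          (fun c => sumBreak (colG rows c))).sum := by
  intro rows
  induction rows with
  | nil =>
    intro b s
    simp only [List.foldl_nil, colG, List.map_nil, sumBreak]
    simp
  | cons r rest ih =>
    intro b s
    simp only [List.foldl_cons]
    obtain ⟨hsum, hmem⟩ := inner_fold r (List.range w) b s
    have hpair : (List.range w).foldl (stepB r) (b, s)
        = (((List.range w).foldl (stepB r) (b, s)).1, ((List.range w).foldl (stepB r) (b, s)).2) := rfl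
    rw [hpair, ih, hsum]
    -- rewrite the filter over the new blocked set
    have hfe : ((List.range w).filter
          (fun c => !PySem.Set.contains ((List.range w).foldl (stepB r) (b, s)).1 c))
        = ((List.range w).filter
          (fun c => !PySem.Set.contains b c && !(r.getD c 0 == 0))) := by
      apply List.filter_congr
      intro c hc
      have h1 := hmem c
      show (!PySem.Set.contains ((List.range w).foldl (stepB r) (b, s)).1 c)
          = (!PySem.Set.contains b c && !(r.getD c 0 == 0))
      cases hb : PySem.Set.contains b c with
      | true =>
        have hct : PySem.Set.contains ((List.range w).foldl (stepB r) (b, s)).1 c = true :=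
          h1.mpr (Or.inl hb)
        rw [hct]
        simp
      | false =>
        by_cases hr : r.getD c 0 = 0
        · have hct : PySem.Set.contains ((List.range w).foldl (stepB r) (b, s)).1 c = true :=
            h1.mpr (Or.inr ⟨hc, hr⟩)
          rw [hct, hr]
          simp
        · have hcf : PySem.Set.contains ((List.range w).foldl (stepB r) (b, s)).1 c = false := by
            cases hcc : PySem.Set.contains ((List.range w).foldl (stepB r) (b, s)).1 c with
            | false => rfl
            | true =>
              rcases h1.mp hcc with h | ⟨_, h2⟩
              · rw [h] at hb; cases hb
              · exact absurd h2 hr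
          rw [hcf]
          cases hgz : ((r.getD c 0) == 0) with
          | true => exact absurd (eq_of_beq hgz) hr
          | false => rfl
    rw [hfe]
    -- split sumBreak over the head row
    have hsplit :
        (((List.range w).filter (fun c => !PySem.Set.contains b c)).map
          (fun c => sumBreak (colG (r :: rest) c))).sum
        = (((List.range w).filter (fun c => !PySem.Set.contains b c && !(r.getD c 0 == 0))).map
            (fun c => r.getD c 0)).sum
          + (((List.range w).filter (fun c => !PySem.Set.contains b c && !(r.getD c 0 == 0))).map
            (fun c => sumBreak (colG rest c))).sum := by
      have hmain := sum_if_split (fun c => r.getD c 0) (fun c => sumBreak (colG rest c))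
        (List.range w) (fun c => !PySem.Set.contains b c)
      have hcg : ∀ c : Nat, sumBreak (colG (r :: rest) c)
          = if r.getD c 0 = 0 then (0:Int) else r.getD c 0 + sumBreak (colG rest c) := by
        intro c
        simp [colG, sumBreak]
      calc (((List.range w).filter (fun c => !PySem.Set.contains b c)).map
            (fun c => sumBreak (colG (r :: rest) c))).sum
          = (((List.range w).filter (fun c => !PySem.Set.contains b c)).map
            (fun c => if r.getD c 0 = 0 then (0:Int) else r.getD c 0 + sumBreak (colG rest c))).sum := by
            exact congrArg List.sum (List.map_congr_left (fun c _ => hcg c))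
        _ = _ := hmain
    rw [hsplit]
    ring

-- ===== VERDICT (by name: the statement is the Claim_ definition above) =====
theorem matrixElementsSum2_spec : Claim_equal_matrixElementsSum2 := by
  intro m _
  unfold Spec_matrixElementsSum2
  match m with
  | [] => simp [matrixElementsSum2, matrixElementsSum2_alt, pyZipStar]
  | r :: rs =>
    have hA : matrixElementsSum2 (r :: rs)
        = ((List.range (wAll (r :: rs))).map (fun c => sumBreak (colG (r :: rs) c))).sum := by
      rw [matrixElementsSum2, pyZipStar_eq (wAll (r :: rs)) (r :: rs) rfl, foldlA_eq]
      simp [List.map_map, Function.comp_def]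
    have hB : matrixElementsSum2_alt (r :: rs)
        = ((List.range (wAll (r :: rs))).map (fun c => sumBreak (colG (r :: rs) c))).sum := by
      show ((r :: rs).foldl
          (fun st row => (List.range (fW rs r.length)).foldl (stepB row) st)
          (PySem.Set.empty, 0)).2 = _
      rw [outer_fold]
      have hflt : ((List.range (fW rs r.length)).filter
            (fun c => !PySem.Set.contains PySem.Set.empty c))
          = List.range (fW rs r.length) := by
        apply List.filter_eq_self.2
        intro c _
        rfl
      rw [hflt]
      simp [wAll]
    rw [hA, hB]
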